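-- pv_equiv track=rewrite | github.com/ferhatelmas/algo | topCoder/srms/500s/srm536/div2/binary_polynomial_div_two.py | countRoots
-- ===== SOURCE A (Python) =====
-- def countRoots(a):
--     c = 0
--     for x in (0, 1):
--         s = 0
--         for i, j in enumerate(a):
--             if not i:
--                 s += j
--             else:
--                 s += j * x**i
--         c += 0 if s%2 else 1
--     return c
-- ===== SOURCE B (Python) =====
-- def countRoots(a):
--     at0 = a[0] if a else 0
--     at1 = sum(a)
--     return (1 if at0 % 2 == 0 else 0) + (1 if at1 % 2 == 0 else 0)
-- ===== Notes on version B (the rewrite author's own statement) =====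
-- stated objective: simpler
-- what changed: Replaces A's loop over x in {0,1} with per-term x**i exponentiation by two closed-form values: p(0) is the constant term (a[0] or 0) and p(1) is sum(a), then counts which is even.
import Mathlib
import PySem

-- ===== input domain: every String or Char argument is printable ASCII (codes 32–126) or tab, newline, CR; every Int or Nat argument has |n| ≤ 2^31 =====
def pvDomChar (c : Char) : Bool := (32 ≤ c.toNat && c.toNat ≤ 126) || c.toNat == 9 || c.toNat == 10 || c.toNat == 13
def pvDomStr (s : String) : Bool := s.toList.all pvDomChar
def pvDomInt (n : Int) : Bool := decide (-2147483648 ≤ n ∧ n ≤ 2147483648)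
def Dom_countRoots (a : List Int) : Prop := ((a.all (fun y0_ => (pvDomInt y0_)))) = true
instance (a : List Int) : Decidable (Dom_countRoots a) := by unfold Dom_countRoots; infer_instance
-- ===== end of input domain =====

-- ===== PORT A =====
-- B replaces A's loop over x∈{0,1} with closed forms p(0)=constant term, p(1)=sum (objective: simpler).
def countRoots (a : List Int) : Int :=
  [(0 : Int), 1].foldl
    (fun c x =>
      let s := (PySem.List.enumerate a).foldl
        (fun s ij => if ij.1 = 0 then s + ij.2 else s + ij.2 * x ^ ij.1.toNat) 0
      c + (if PySem.Int.mod s 2 ≠ 0 then 0 else 1)) 0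

-- ===== PORT B =====
def countRoots_alt (a : List Int) : Int :=
  let at0 := a.headD 0
  let at1 := a.sum
  (if PySem.Int.mod at0 2 = 0 then (1 : Int) else 0) +
  (if PySem.Int.mod at1 2 = 0 then (1 : Int) else 0)

-- ===== PRECONDITION & SPEC =====
def Spec_countRoots (a : List Int) (out : Int) : Prop := out = countRoots_alt a
instance (a : List Int) (out : Int) : Decidable (Spec_countRoots a out) := by unfold Spec_countRoots; infer_instance

-- ===== CLAIM (what is proved, stated in full; the proofs are below) =====
def Claim_equal_countRoots : Prop := ∀ (a : List Int), Dom_countRoots a → Spec_countRoots a (countRoots a)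

-- ===== LEMMAS AND PROOFS =====

-- ===== VERDICT (by name: the statement is the Claim_ definition above) =====
-- inner fold at x = 1 adds every coefficient
theorem pv_fold_one (l : List Int) (n : Int) (s : Int) :
    (PySem.List.enumerate l n).foldl
      (fun s ij => if ij.1 = 0 then s + ij.2 else s + ij.2 * (1 : Int) ^ ij.1.toNat) s
    = s + l.sum := by
  induction l generalizing n s with
  | nil => simp [PySem.List.enumerate_nil]
  | cons h t ih =>
    simp only [PySem.List.enumerate_cons, List.foldl_cons, List.sum_cons, ih]
    split <;> ring

-- inner fold at x = 0 over indices ≥ 1 adds nothing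
theorem pv_fold_zero_tail (l : List Int) (n : Int) (hn : 1 ≤ n) (s : Int) :
    (PySem.List.enumerate l n).foldl
      (fun s ij => if ij.1 = 0 then s + ij.2 else s + ij.2 * (0 : Int) ^ ij.1.toNat) s
    = s := by
  induction l generalizing n s with
  | nil => simp [PySem.List.enumerate_nil]
  | cons h t ih =>
    simp only [PySem.List.enumerate_cons, List.foldl_cons]
    rw [if_neg (by omega)]
    rw [zero_pow (by omega : n.toNat ≠ 0)]
    rw [ih (n + 1) (by omega)]
    ring_nf

theorem countRoots_spec : Claim_equal_countRoots := by
  intro a _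
  unfold Spec_countRoots countRoots countRoots_alt
  cases a with
  | nil => decide
  | cons h t =>
    simp only [List.foldl_cons, List.foldl_nil, PySem.List.enumerate_cons, if_true]
    rw [pv_fold_zero_tail t (0 + 1) (by omega) (0 + h)]
    rw [pv_fold_one t (0 + 1) (0 + h)]
    simp only [List.headD, List.sum_cons, ne_eq, ite_not, zero_add]
    rfl
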